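-- pv_equiv track=rewrite | github.com/redm0-0n/Optimization-for-Printed-Circuit-Boards | src/optimization/fitness.py | _calculate_vias
-- ===== SOURCE A (Python) =====
-- from typing import Dict, List, Tuple, Optional
--
-- def _calculate_vias(routes: Dict[str, List[Tuple[int, int]]]) -> int:
--     vias = 0
--     for route in routes.values():
--         if len(route) < 2:
--             continue
--
--         for i in range(1, len(route) - 1):
--             prev_dir = (route[i][0] - route[i-1][0], route[i][1] - route[i-1][1])
--             next_dir = (route[i+1][0] - route[i][0], route[i+1][1] - route[i][1])
--             if prev_dir != next_dir:
--                 vias += 1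
--
--     return vias
-- ===== SOURCE B (Python) =====
-- def _delta(route, j):
--     return (route[j + 1][0] - route[j][0], route[j + 1][1] - route[j][1])
--
--
-- def _calculate_vias(routes):
--     total = 0
--     for route in routes.values():
--         n = len(route)
--         if n < 2:
--             continue
--         # count maximal runs of equal direction by skipping ahead over each run;
--         # the number of vias in the route is (number of runs) - 1
--         runs = 0
--         i = 0
--         while i < n - 1:
--             d = _delta(route, i)
--             j = i + 1
--             while j < n - 1 and _delta(route, j) == d:
--                 j += 1
--             i = j
--             runs += 1
--         total += runs - 1
--     return total
-- ===== Notes on version B (the rewrite author's own statement) =====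
-- stated objective: alternative
-- what changed: B counts, per route, the maximal runs of equal direction with a skip-ahead nested-while scan and returns (runs - 1) summed over routes, instead of A's index loop that recomputes prev/next direction at each interior point and counts mismatches.
import Mathlib
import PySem

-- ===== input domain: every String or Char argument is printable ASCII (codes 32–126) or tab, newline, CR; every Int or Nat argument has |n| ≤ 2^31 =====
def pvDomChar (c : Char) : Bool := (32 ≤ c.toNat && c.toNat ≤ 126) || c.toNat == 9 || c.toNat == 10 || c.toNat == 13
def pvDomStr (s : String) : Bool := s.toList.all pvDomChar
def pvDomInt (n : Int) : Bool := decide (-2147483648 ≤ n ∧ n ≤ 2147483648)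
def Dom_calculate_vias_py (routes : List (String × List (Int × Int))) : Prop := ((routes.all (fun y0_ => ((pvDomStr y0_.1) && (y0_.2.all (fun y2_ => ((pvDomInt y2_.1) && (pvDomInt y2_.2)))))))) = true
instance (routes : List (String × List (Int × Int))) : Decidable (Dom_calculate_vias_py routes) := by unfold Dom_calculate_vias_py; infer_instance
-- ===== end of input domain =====

-- B counts, per route, the maximal runs of equal direction with a skip-ahead nested-while
-- scan and sums (runs - 1), instead of A's per-index prev/next mismatch count (alternative).

-- ===== PORT A =====
def calculate_vias_py (routes : List (String × List (Int × Int))) : Int :=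
  routes.foldl (fun vias r =>
    let route := r.2
    if route.length < 2 then vias
    else
      (PySem.List.pyRange 1 ((route.length : Int) - 1)).foldl (fun acc i =>
        let prev_dir : Int × Int :=
          ((PySem.List.pyGetD route i ((0:Int),(0:Int))).1 - (PySem.List.pyGetD route (i-1) ((0:Int),(0:Int))).1,
           (PySem.List.pyGetD route i ((0:Int),(0:Int))).2 - (PySem.List.pyGetD route (i-1) ((0:Int),(0:Int))).2)
        let next_dir : Int × Int :=
          ((PySem.List.pyGetD route (i+1) ((0:Int),(0:Int))).1 - (PySem.List.pyGetD route i ((0:Int),(0:Int))).1,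
           (PySem.List.pyGetD route (i+1) ((0:Int),(0:Int))).2 - (PySem.List.pyGetD route i ((0:Int),(0:Int))).2)
        if prev_dir ≠ next_dir then acc + 1 else acc) vias) 0

-- ===== PORT B =====
-- helper _delta(route, j) of Source B
def pvDelta (route : List (Int × Int)) (j : Int) : Int × Int :=
  ((PySem.List.pyGetD route (j+1) ((0:Int),(0:Int))).1 - (PySem.List.pyGetD route j ((0:Int),(0:Int))).1,
   (PySem.List.pyGetD route (j+1) ((0:Int),(0:Int))).2 - (PySem.List.pyGetD route j ((0:Int),(0:Int))).2)

-- inner while loop of Source B: advance j over the current run of direction d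
def pvInnerB (route : List (Int × Int)) (n : Int) (d : Int × Int) (j : Int) : Int :=
  if j < n - 1 ∧ pvDelta route j = d then pvInnerB route n d (j + 1) else j
termination_by (n - 1 - j).toNat
decreasing_by omega

-- the inner loop never moves j backwards (termination of the outer loop cites this)
theorem pvInnerB_ge (route : List (Int × Int)) (n : Int) (d : Int × Int) (j : Int) :
    j ≤ pvInnerB route n d j := by
  rw [pvInnerB]
  split
  · have := pvInnerB_ge route n d (j + 1); omega
  · omega
termination_by (n - 1 - j).toNat
decreasing_by omega

-- outer while loop of Source B: count maximal runs
def pvOuterB (route : List (Int × Int)) (n : Int) (i : Int) (runs : Int) : Int :=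
  if i < n - 1 then pvOuterB route n (pvInnerB route n (pvDelta route i) (i + 1)) (runs + 1) else runs
termination_by (n - 1 - i).toNat
decreasing_by have := pvInnerB_ge route n (pvDelta route i) (i + 1); omega

def calculate_vias_py_alt (routes : List (String × List (Int × Int))) : Int :=
  routes.foldl (fun total r =>
    let route := r.2
    let n : Int := (route.length : Int)
    if n < 2 then total
    else total + (pvOuterB route n 0 0 - 1)) 0

-- ===== PRECONDITION & SPEC =====
def Spec_calculate_vias_py (routes : List (String × List (Int × Int))) (out : Int) : Prop := out = calculate_vias_py_alt routes
instance (routes : List (String × List (Int × Int))) (out : Int) : Decidable (Spec_calculate_vias_py routes out) := by unfold Spec_calculate_vias_py; infer_instance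

-- ===== CLAIM (what is proved, stated in full; the proofs are below) =====
def Claim_equal_calculate_vias_py : Prop := ∀ (routes : List (String × List (Int × Int))), Dom_calculate_vias_py routes → Spec_calculate_vias_py routes (calculate_vias_py routes)

-- ===== LEMMAS AND PROOFS =====

-- the Boolean test A evaluates at interior index i of a route
def pvCond (xs : List (Int × Int)) (i : Int) : Bool :=
  decide ((((PySem.List.pyGetD xs i ((0:Int),(0:Int))).1 - (PySem.List.pyGetD xs (i-1) ((0:Int),(0:Int))).1,
            (PySem.List.pyGetD xs i ((0:Int),(0:Int))).2 - (PySem.List.pyGetD xs (i-1) ((0:Int),(0:Int))).2) : Int × Int)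
          ≠ ((PySem.List.pyGetD xs (i+1) ((0:Int),(0:Int))).1 - (PySem.List.pyGetD xs i ((0:Int),(0:Int))).1,
             (PySem.List.pyGetD xs (i+1) ((0:Int),(0:Int))).2 - (PySem.List.pyGetD xs i ((0:Int),(0:Int))).2))

-- the common reference count: direction changes along a route
def pvTriple : List (Int × Int) → Nat
  | a :: b :: c :: t =>
      (if ((b.1 - a.1, b.2 - a.2) : Int × Int) ≠ (c.1 - b.1, c.2 - b.2) then 1 else 0) + pvTriple (b :: c :: t)
  | _ => 0

-- the route's list of consecutive direction vectors (proof-only abstraction)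
def pvDeltas (xs : List (Int × Int)) : List (Int × Int) :=
  (xs.zip xs.tail).map (fun p => (p.2.1 - p.1.1, p.2.2 - p.1.2))

-- number of maximal runs of equal elements
def pvRuns (l : List (Int × Int)) : Nat :=
  match l with
  | [] => 0
  | d :: ds => 1 + pvRuns (ds.dropWhile (fun e => e == d))
termination_by l.length
decreasing_by simp only [List.length_cons]; exact Nat.lt_succ_of_le (List.length_dropWhile_le _ _)

-- number of adjacent mismatches
def pvMism : List (Int × Int) → Nat
  | a :: b :: t => (if a = b then 0 else 1) + pvMism (b :: t)
  | _ => 0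

lemma pv_countP_pyRange_shift (p : Int → Bool) (a b : Int) :
    (PySem.List.pyRange (a+1) (b+1)).countP p = (PySem.List.pyRange a b).countP (fun i => p (i+1)) := by
  by_cases h : a < b
  · have hn : (b - a).toNat ≠ 0 := by omega
    induction hk : (b - a).toNat generalizing a with
    | zero => omega
    | succ n ih =>
      rw [PySem.List.pyRange_one_cons (by omega : a + 1 < b + 1),
          PySem.List.pyRange_one_cons h, List.countP_cons, List.countP_cons]
      by_cases h2 : a + 1 < b
      · rw [ih (a + 1) h2 (by omega) (by omega)]
      · rw [PySem.List.pyRange_one_eq_nil (by omega : b ≤ a + 1),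
            PySem.List.pyRange_one_eq_nil (by omega : b + 1 ≤ a + 1 + 1)]
        simp
  · rw [PySem.List.pyRange_one_eq_nil (by omega : b + 1 ≤ a + 1),
        PySem.List.pyRange_one_eq_nil (by omega : b ≤ a)]
    simp

lemma pv_pyGetD_cons_pos (x : Int × Int) (xs : List (Int × Int)) (i : Int) (h : 1 ≤ i) :
    PySem.List.pyGetD (x :: xs) i ((0:Int),(0:Int)) = PySem.List.pyGetD xs (i-1) ((0:Int),(0:Int)) := by
  rw [PySem.List.pyGetD_of_nonneg _ _ (by omega), PySem.List.pyGetD_of_nonneg _ _ (by omega)]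
  have : i.toNat = (i-1).toNat + 1 := by omega
  rw [this]
  rfl

lemma pv_cond_shift (a : Int × Int) (ys : List (Int × Int)) (i : Int) (h : 1 ≤ i) :
    pvCond (a :: ys) (i + 1) = pvCond ys i := by
  unfold pvCond
  rw [pv_pyGetD_cons_pos a ys (i+1) (by omega), pv_pyGetD_cons_pos a ys (i+1-1) (by omega),
      pv_pyGetD_cons_pos a ys (i+1+1) (by omega)]
  norm_num

lemma pv_countA_eq_triple (xs : List (Int × Int)) :
    (PySem.List.pyRange 1 ((xs.length : Int) - 1)).countP (pvCond xs) = pvTriple xs := by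
  induction xs with
  | nil => simp [PySem.List.pyRange_one_eq_nil, pvTriple]
  | cons a ys ih =>
    match ys with
    | [] => simp [PySem.List.pyRange_one_eq_nil, pvTriple]
    | [b] =>
      rw [PySem.List.pyRange_one_eq_nil (by simp)]
      simp [pvTriple]
    | b :: c :: t =>
      have hlen : ((a :: b :: c :: t).length : Int) - 1 = ((b :: c :: t).length : Int) := by
        simp only [List.length_cons]; push_cast; ring
      rw [hlen]
      have h1 : (1 : Int) < ((b :: c :: t).length : Int) := by
        simp only [List.length_cons]; push_cast; omega
      rw [PySem.List.pyRange_one_cons h1, List.countP_cons,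
          show (((b :: c :: t).length : Int)) = (((b :: c :: t).length : Int) - 1) + 1 from by ring,
          pv_countP_pyRange_shift]
      have hc : (PySem.List.pyRange 1 (((b :: c :: t).length : Int) - 1)).countP (fun i => pvCond (a :: b :: c :: t) (i+1))
          = (PySem.List.pyRange 1 (((b :: c :: t).length : Int) - 1)).countP (pvCond (b :: c :: t)) := by
        apply List.countP_congr
        intro i hi
        rw [pv_cond_shift a (b :: c :: t) i (PySem.List.mem_pyRange_one.mp hi).1]
      rw [hc, ih]
      have hhead : pvCond (a :: b :: c :: t) 1
          = decide (((b.1 - a.1, b.2 - a.2) : Int × Int) ≠ (c.1 - b.1, c.2 - b.2)) := by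
        unfold pvCond
        norm_num [PySem.List.pyGetD_of_nonneg, show Int.toNat 2 = 2 from rfl,
          List.getElem?_cons_succ, List.getElem?_cons_zero]
      rw [hhead]
      conv_rhs => rw [pvTriple]
      by_cases hd : (((b.1 - a.1, b.2 - a.2) : Int × Int) ≠ (c.1 - b.1, c.2 - b.2)) <;>
        · simp [hd]
          try omega

lemma pv_stepA (l : List (Int × Int)) (v : Int) :
    (if l.length < 2 then v
     else (PySem.List.pyRange 1 ((l.length : Int) - 1)).foldl (fun acc i =>
        if (((PySem.List.pyGetD l i ((0:Int),(0:Int))).1 - (PySem.List.pyGetD l (i-1) ((0:Int),(0:Int))).1,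
             (PySem.List.pyGetD l i ((0:Int),(0:Int))).2 - (PySem.List.pyGetD l (i-1) ((0:Int),(0:Int))).2) : Int × Int)
           ≠ ((PySem.List.pyGetD l (i+1) ((0:Int),(0:Int))).1 - (PySem.List.pyGetD l i ((0:Int),(0:Int))).1,
              (PySem.List.pyGetD l (i+1) ((0:Int),(0:Int))).2 - (PySem.List.pyGetD l i ((0:Int),(0:Int))).2)
        then acc + 1 else acc) v) = v + (pvTriple l : Int) := by
  by_cases h2 : l.length < 2
  · rw [if_pos h2]
    rcases l with _ | ⟨x, _ | ⟨y, t⟩⟩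
    · simp [pvTriple]
    · simp [pvTriple]
    · simp at h2
  · rw [if_neg h2, PySem.List.foldl_ite_add_one]
    exact congrArg (fun n : Nat => v + (n : Int)) (pv_countA_eq_triple l)

-- ---- B side ----

lemma pvDeltas_length (xs : List (Int × Int)) : (pvDeltas xs).length = xs.length - 1 := by
  simp [pvDeltas, List.length_zip, List.length_tail]

lemma pvDelta_eq_getElem (xs : List (Int × Int)) (j : Int) (h0 : 0 ≤ j)
    (h1 : j < (xs.length : Int) - 1) :
    pvDelta xs j = (pvDeltas xs)[j.toNat]'(by rw [pvDeltas_length]; omega) := by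
  have hj1 : j.toNat + 1 < xs.length := by omega
  have hj : j.toNat < xs.length := by omega
  unfold pvDelta
  rw [PySem.List.pyGetD_eq_getElem (i := j + 1) xs ((0:Int),(0:Int)) (by omega) (by push_cast; omega),
      PySem.List.pyGetD_eq_getElem (i := j) xs ((0:Int),(0:Int)) h0 (by push_cast; omega)]
  have ht : (j + 1).toNat = j.toNat + 1 := by omega
  simp [pvDeltas, ht, List.getElem_zip, List.getElem_tail]

lemma pv_drop_length_takeWhile (p : Int × Int → Bool) (l : List (Int × Int)) :
    l.drop (l.takeWhile p).length = l.dropWhile p := by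
  induction l with
  | nil => rfl
  | cons a t ih =>
    by_cases h : p a
    · simp [List.takeWhile_cons, List.dropWhile_cons, h, ih]
    · simp [List.takeWhile_cons, List.dropWhile_cons, h]

lemma pvInnerB_eq (route : List (Int × Int)) (d : Int × Int) (j : Int) (h0 : 0 ≤ j) :
    pvInnerB route (route.length : Int) d j
      = j + ((((pvDeltas route).drop j.toNat).takeWhile (fun e => e == d)).length : Int) := by
  rw [pvInnerB]
  by_cases hb : j < (route.length : Int) - 1 ∧ pvDelta route j = d
  · rw [if_pos hb]
    have hlt : j.toNat < (pvDeltas route).length := by rw [pvDeltas_length]; omega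
    have hdrop : (pvDeltas route).drop j.toNat
        = (pvDeltas route)[j.toNat] :: (pvDeltas route).drop (j.toNat + 1) :=
      List.drop_eq_getElem_cons hlt
    have hhd : ((pvDeltas route)[j.toNat]'hlt == d) = true := by
      rw [← pvDelta_eq_getElem route j h0 hb.1, hb.2]; simp
    rw [pvInnerB_eq route d (j + 1) (by omega), hdrop]
    have ht : (j + 1).toNat = j.toNat + 1 := by omega
    rw [List.takeWhile_cons, hhd, ht]
    simp only [if_true, List.length_cons]
    push_cast
    omega
  · rw [if_neg hb]
    by_cases hj : j < (route.length : Int) - 1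
    · have hne : pvDelta route j ≠ d := by tauto
      have hlt : j.toNat < (pvDeltas route).length := by rw [pvDeltas_length]; omega
      have hdrop : (pvDeltas route).drop j.toNat
          = (pvDeltas route)[j.toNat] :: (pvDeltas route).drop (j.toNat + 1) :=
        List.drop_eq_getElem_cons hlt
      have hhd : ((pvDeltas route)[j.toNat]'hlt == d) = false := by
        rw [← pvDelta_eq_getElem route j h0 hj]
        simpa using hne
      rw [hdrop, List.takeWhile_cons, hhd]
      simp
    · have : (pvDeltas route).drop j.toNat = [] :=
        List.drop_eq_nil_of_le (by rw [pvDeltas_length]; omega)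
      rw [this]
      simp
termination_by ((route.length : Int) - 1 - j).toNat
decreasing_by omega

lemma pvOuterB_eq (route : List (Int × Int)) (i runs : Int) (h0 : 0 ≤ i) :
    pvOuterB route (route.length : Int) i runs
      = runs + (pvRuns ((pvDeltas route).drop i.toNat) : Int) := by
  rw [pvOuterB]
  by_cases hb : i < (route.length : Int) - 1
  · rw [if_pos hb]
    set d := pvDelta route i with hd
    have hlt : i.toNat < (pvDeltas route).length := by rw [pvDeltas_length]; omega
    have hdrop : (pvDeltas route).drop i.toNat
        = (pvDeltas route)[i.toNat] :: (pvDeltas route).drop (i.toNat + 1) :=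
      List.drop_eq_getElem_cons hlt
    have hhead : (pvDeltas route)[i.toNat]'hlt = d := (pvDelta_eq_getElem route i h0 hb).symm
    set rest := (pvDeltas route).drop (i.toNat + 1) with hrest
    set T := rest.takeWhile (fun e => e == d) with hT
    have hinner : pvInnerB route (route.length : Int) d (i + 1) = (i + 1) + (T.length : Int) := by
      rw [pvInnerB_eq route d (i + 1) (by omega)]
      have : (i + 1).toNat = i.toNat + 1 := by omega
      rw [this]
    have hj0 : 0 ≤ (i + 1) + (T.length : Int) := by omega
    rw [hinner, pvOuterB_eq route ((i + 1) + (T.length : Int)) (runs + 1) hj0]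
    have htn : ((i + 1) + (T.length : Int)).toNat = (i.toNat + 1) + T.length := by omega
    have hdd : (pvDeltas route).drop (((i + 1) + (T.length : Int)).toNat) = rest.dropWhile (fun e => e == d) := by
      rw [htn, ← List.drop_drop, ← hrest, hT, pv_drop_length_takeWhile]
    rw [hdd, hdrop]
    conv_rhs => rw [pvRuns]
    rw [hhead]
    push_cast
    ring
  · rw [if_neg hb]
    have : (pvDeltas route).drop i.toNat = [] :=
      List.drop_eq_nil_of_le (by rw [pvDeltas_length]; omega)
    rw [this]
    simp [pvRuns]
termination_by ((route.length : Int) - 1 - i).toNat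
decreasing_by
  have := pvInnerB_ge route (route.length : Int) (pvDelta route i) (i + 1)
  omega

lemma pvRuns_eq_mism_succ : ∀ (ds : List (Int × Int)) (d : Int × Int),
    pvRuns (d :: ds) = pvMism (d :: ds) + 1 := by
  intro ds
  induction ds with
  | nil => intro d; simp [pvRuns, pvMism]
  | cons e t ih =>
    intro d
    by_cases h : e = d
    · subst h
      rw [pvRuns, List.dropWhile_cons]
      simp only [beq_self_eq_true, if_pos]
      have h2 : pvRuns (e :: t) = 1 + pvRuns (t.dropWhile (fun x => x == e)) := by rw [pvRuns]
      rw [← h2, ih e]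
      simp [pvMism]
    · have hb : (e == d) = false := beq_eq_false_iff_ne.mpr h
      rw [pvRuns, List.dropWhile_cons, hb]
      simp only [Bool.false_eq_true, if_false]
      rw [ih e, pvMism, if_neg (fun hde => h hde.symm)]
      omega

lemma pvMism_deltas (xs : List (Int × Int)) : pvMism (pvDeltas xs) = pvTriple xs := by
  induction xs with
  | nil => simp [pvDeltas, pvMism, pvTriple]
  | cons a ys ih =>
    match ys with
    | [] => simp [pvDeltas, pvMism, pvTriple]
    | [b] => simp [pvDeltas, pvMism, pvTriple]
    | b :: c :: t =>
      have h1 : pvDeltas (a :: b :: c :: t)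
          = (b.1 - a.1, b.2 - a.2) :: pvDeltas (b :: c :: t) := rfl
      have h2 : pvDeltas (b :: c :: t)
          = (c.1 - b.1, c.2 - b.2) :: pvDeltas (c :: t) := rfl
      rw [h1, h2, pvMism, ← h2, ih]
      conv_rhs => rw [pvTriple]
      by_cases hd : (((b.1 - a.1, b.2 - a.2) : Int × Int) = (c.1 - b.1, c.2 - b.2)) <;> simp [hd]

lemma pv_stepB (l : List (Int × Int)) (v : Int) :
    (if (l.length : Int) < 2 then v else v + (pvOuterB l (l.length : Int) 0 0 - 1))
      = v + (pvTriple l : Int) := by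
  by_cases h2 : (l.length : Int) < 2
  · rw [if_pos h2]
    rcases l with _ | ⟨x, _ | ⟨y, t⟩⟩
    · simp [pvTriple]
    · simp [pvTriple]
    · simp at h2; omega
  · rw [if_neg h2, pvOuterB_eq l 0 0 le_rfl]
    have hne : pvDeltas l ≠ [] := by
      intro h
      have := pvDeltas_length l
      rw [h] at this
      simp at this
      omega
    obtain ⟨d, ds, hds⟩ := List.exists_cons_of_ne_nil hne
    rw [show (Int.toNat 0) = 0 from rfl, List.drop_zero, hds, pvRuns_eq_mism_succ, ← hds]
    rw [pvMism_deltas]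
    push_cast
    ring

lemma pv_fold_eq (routes : List (String × List (Int × Int))) :
    ∀ v : Int,
      routes.foldl (fun vias r =>
        let route := r.2
        if route.length < 2 then vias
        else
          (PySem.List.pyRange 1 ((route.length : Int) - 1)).foldl (fun acc i =>
            let prev_dir : Int × Int :=
              ((PySem.List.pyGetD route i ((0:Int),(0:Int))).1 - (PySem.List.pyGetD route (i-1) ((0:Int),(0:Int))).1,
               (PySem.List.pyGetD route i ((0:Int),(0:Int))).2 - (PySem.List.pyGetD route (i-1) ((0:Int),(0:Int))).2)
            let next_dir : Int × Int :=
              ((PySem.List.pyGetD route (i+1) ((0:Int),(0:Int))).1 - (PySem.List.pyGetD route i ((0:Int),(0:Int))).1,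
               (PySem.List.pyGetD route (i+1) ((0:Int),(0:Int))).2 - (PySem.List.pyGetD route i ((0:Int),(0:Int))).2)
            if prev_dir ≠ next_dir then acc + 1 else acc) vias) v
      = routes.foldl (fun total r =>
          let route := r.2
          let n : Int := (route.length : Int)
          if n < 2 then total
          else total + (pvOuterB route n 0 0 - 1)) v := by
  induction routes with
  | nil => intro v; rfl
  | cons r rs ih =>
    intro v
    simp only [List.foldl_cons]
    rw [ih]
    congr 1
    exact (pv_stepA r.2 v).trans ((pv_stepB r.2 v).symm)

-- ===== VERDICT (by name: the statement is the Claim_ definition above) =====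
theorem calculate_vias_py_spec : Claim_equal_calculate_vias_py := by
  intro routes _
  unfold Spec_calculate_vias_py calculate_vias_py calculate_vias_py_alt
  exact pv_fold_eq routes 0
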